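-- pv_equiv track=rewrite | github.com/Mikhailo-Dzham/Homework | HW09/Dzham_9_13.py | create_latin_english_dictionary
-- ===== SOURCE A (Python) =====
-- def create_latin_english_dictionary(n, english_latin_dict):
--     latin_english_dict = {}
--
--     for entry in english_latin_dict:
--         english_word, translations = entry.split(' - ')
--         latin_words = translations.split(', ')
--
--         for latin_word in latin_words:
--             if latin_word not in latin_english_dict:
--                 latin_english_dict[latin_word] = []
--             latin_english_dict[latin_word].append(english_word)
--
--     sorted_latin_english_dict = sorted(latin_english_dict.items())
--
--     result = []
--     for latin_word, english_words in sorted_latin_english_dict: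
--         result.append(f"{latin_word} - {', '.join(sorted(english_words))}")
--
--     return result
-- ===== SOURCE B (Python) =====
-- def create_latin_english_dictionary(n, english_latin_dict):
--     pairs = []
--     for entry in english_latin_dict:
--         english_word, translations = entry.split(' - ')
--         for latin_word in translations.split(', '):
--             pairs.append((latin_word, english_word))
--     pairs.sort()
--     result = []
--     prev = None
--     for latin_word, english_word in pairs:
--         if result and latin_word == prev:
--             result[-1] += ', ' + english_word
--         else:
--             result.append(latin_word + ' - ' + english_word)
--             prev = latin_word
--     return result
-- ===== Notes on version B (the rewrite author's own statement) =====
-- stated objective: alternative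
-- what changed: A groups pairs into a dict keyed by latin word and then sorts the keys and each value list separately; B flattens the entries into one flat list of (latin, english) pairs, sorts it once by the full tuple, and emits each group in a single adjacent scan with no dict at all.
import Mathlib
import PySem

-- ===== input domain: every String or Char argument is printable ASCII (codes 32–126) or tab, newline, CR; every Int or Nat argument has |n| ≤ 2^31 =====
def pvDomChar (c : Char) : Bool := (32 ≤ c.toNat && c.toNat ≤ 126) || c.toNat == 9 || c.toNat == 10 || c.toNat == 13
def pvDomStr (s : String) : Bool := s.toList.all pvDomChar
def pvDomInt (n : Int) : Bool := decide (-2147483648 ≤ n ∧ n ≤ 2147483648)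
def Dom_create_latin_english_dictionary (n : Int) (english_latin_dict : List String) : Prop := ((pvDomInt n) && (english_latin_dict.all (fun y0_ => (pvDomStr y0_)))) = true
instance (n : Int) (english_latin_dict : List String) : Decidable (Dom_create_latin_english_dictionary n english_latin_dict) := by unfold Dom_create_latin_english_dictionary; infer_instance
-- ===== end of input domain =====

-- B replaces A's hash-grouping (dict of latin → english list, sorted afterwards, each value list
-- sorted separately) by flattening the entries into (latin, english) pairs, sorting that list once,
-- and emitting the groups in one adjacent scan; objective: alternative algorithm of similar cost.

-- ===== PORT A =====
def create_latin_english_dictionary (n : Int) (english_latin_dict : List String) : List String :=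
  let latin_english_dict : PySem.Dict String (List String) :=
    english_latin_dict.foldl (fun d entry =>
      match PySem.Str.split? entry " - " with
      | some [english_word, translations] =>
        -- ", " ≠ "" so split? is always `some`; `.getD []` just unwraps it
        ((PySem.Str.split? translations ", ").getD []).foldl (fun d latin_word =>
          let d' := if PySem.Dict.get? d latin_word = none then PySem.Dict.insert d latin_word [] else d
          PySem.Dict.modify d' latin_word [] (fun ws => ws ++ [english_word])) d
      | _ => d   -- Python raises ValueError (tuple unpack) here; excluded by Pre_
      ) ⟨[]⟩
  -- sorted(d.items()): dict keys are distinct, so Python's tuple comparison never reaches the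
  -- value lists; sorting by the key alone is exact
  (PySem.List.sorted latin_english_dict.items (fun p => p.1)).foldl
    (fun result p =>
      result ++ [p.1 ++ " - " ++ PySem.Str.join ", " (PySem.List.sorted p.2 (fun w => w))]) []

-- ===== PORT B =====
-- B-side helper: entry.split(' - ') unpacked into exactly two parts (none where Python's
-- tuple unpack raises ValueError)
def bParse (entry : String) : Option (String × String) :=
  (PySem.Str.split? entry " - ").bind (fun parts =>
    if parts.length = 2 then some (parts[0]!, parts[1]!) else none)

def create_latin_english_dictionary_alt (n : Int) (english_latin_dict : List String) : List String :=
  let pairs : List (String × String) :=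
    english_latin_dict.foldl (fun ps entry =>
      match bParse entry with
      | some (english_word, translations) =>
        ((PySem.Str.split? translations ", ").getD []).foldl
          (fun ps latin_word => ps ++ [(latin_word, english_word)]) ps
      | none => ps   -- Python raises ValueError here; excluded by Pre_
      ) []
  let spairs := PySem.List.sorted2 pairs (fun p => p.1) (fun p => p.2)
  (spairs.foldl (fun (st : List String × Option String) p =>
      if st.1 ≠ [] ∧ some p.1 = st.2 then
        (st.1.dropLast ++ [st.1.getLast! ++ ", " ++ p.2], st.2)
      else
        (st.1 ++ [p.1 ++ " - " ++ p.2], some p.1)) ([], none)).1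

-- ===== PRECONDITION & SPEC =====
-- Pre_ excludes exactly the entries on which Python's 2-tuple unpack of entry.split(' - ')
-- raises ValueError: every entry must split on ' - ' into exactly two parts.
def Pre_create_latin_english_dictionary (n : Int) (english_latin_dict : List String) : Prop :=
  ∀ entry ∈ english_latin_dict, ((PySem.Str.split? entry " - ").getD []).length = 2
instance (n : Int) (english_latin_dict : List String) : Decidable (Pre_create_latin_english_dictionary n english_latin_dict) := by unfold Pre_create_latin_english_dictionary; infer_instance

def pvWitness_create_latin_english_dictionary : Int × List String :=
  (0, ["cat - felis", "dog - canis, canes", "big - magnus"])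

def Spec_create_latin_english_dictionary (n : Int) (english_latin_dict : List String) (out : List String) : Prop := out = create_latin_english_dictionary_alt n english_latin_dict
instance (n : Int) (english_latin_dict : List String) (out : List String) : Decidable (Spec_create_latin_english_dictionary n english_latin_dict out) := by unfold Spec_create_latin_english_dictionary; infer_instance

-- ===== CLAIM (what is proved, stated in full; the proofs are below) =====
def Claim_equal_create_latin_english_dictionary : Prop := ∀ (n : Int) (english_latin_dict : List String), Dom_create_latin_english_dictionary n english_latin_dict → Pre_create_latin_english_dictionary n english_latin_dict → Spec_create_latin_english_dictionary n english_latin_dict (create_latin_english_dictionary n english_latin_dict)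

-- ===== LEMMAS AND PROOFS =====

-- The (latin, english) pairs contributed by one entry, and by the whole input.
def entryPairs (entry : String) : List (String × String) :=
  match bParse entry with
  | some (english_word, translations) =>
      ((PySem.Str.split? translations ", ").getD []).map (fun l => (l, english_word))
  | none => []

def pairsOf (lst : List String) : List (String × String) := lst.flatMap entryPairs

-- englishes paired with key k, in input order
def valuesOf (ps : List (String × String)) (k : String) : List String :=
  (ps.filter (fun p => p.1 == k)).map Prod.snd

def keysOf (ps : List (String × String)) : List String := PySem.List.dedup (ps.map Prod.fst)

def sortedKeys (ps : List (String × String)) : List String :=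
  PySem.List.sorted (keysOf ps) (fun k => k)

-- A's per-pair dict step
def pstep (d : PySem.Dict String (List String)) (p : String × String) :
    PySem.Dict String (List String) :=
  let d' := if PySem.Dict.get? d p.1 = none then PySem.Dict.insert d p.1 [] else d
  PySem.Dict.modify d' p.1 [] (fun ws => ws ++ [p.2])

-- assoc-list grouping step equivalent to pstep on nodup-key items
def upsert (acc : List (String × List String)) (l e : String) : List (String × List String) :=
  match acc with
  | [] => [(l, [e])]
  | (k, vs) :: t => if k = l then (k, vs ++ [e]) :: t else (k, vs) :: upsert t l e

def groupPairs (ps : List (String × String)) : List (String × List String) :=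
  ps.foldl (fun acc p => upsert acc p.1 p.2) []

def alook : List (String × List String) → String → Option (List String)
  | [], _ => none
  | (k, vs) :: t, l => if k = l then some vs else alook t l

-- B's grouping step
def gstep (st : List String × Option String) (p : String × String) :
    List String × Option String :=
  if st.1 ≠ [] ∧ some p.1 = st.2 then
    (st.1.dropLast ++ [st.1.getLast! ++ ", " ++ p.2], st.2)
  else
    (st.1 ++ [p.1 ++ " - " ++ p.2], some p.1)

def joinTail (s : String) (es : List String) : String :=
  es.foldl (fun s e => s ++ ", " ++ e) s

def fmt (ps : List (String × String)) (k : String) : String :=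
  k ++ " - " ++ PySem.Str.join ", " (PySem.List.sorted (valuesOf ps k) (fun w => w))

def lexLe (a b : String × String) : Prop := a.1 < b.1 ∨ (a.1 = b.1 ∧ a.2 ≤ b.2)


lemma getLast!_concat (l : List String) (s : String) : (l ++ [s]).getLast! = s := by
  induction l with
  | nil => rfl
  | cons a t ih => simpa [List.getLast!] using ih

lemma join_cons₂ (s a b : String) (t : List String) :
    PySem.Str.join s (a :: b :: t) = a ++ s ++ PySem.Str.join s (b :: t) := by
  simp [PySem.Str.join, PySem.Chars.join, List.intercalate, String.ofList_append,
    String.append_assoc]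

lemma join_single (s a : String) : PySem.Str.join s [a] = a := by
  simp [PySem.Str.join, PySem.Chars.join, List.intercalate]

lemma A_pairs (lst : List String) (d : PySem.Dict String (List String)) :
    lst.foldl (fun d entry =>
      match PySem.Str.split? entry " - " with
      | some [english_word, translations] =>
        ((PySem.Str.split? translations ", ").getD []).foldl (fun d latin_word =>
          let d' := if PySem.Dict.get? d latin_word = none then PySem.Dict.insert d latin_word [] else d
          PySem.Dict.modify d' latin_word [] (fun ws => ws ++ [english_word])) d
      | _ => d) d = (pairsOf lst).foldl pstep d := by
  induction lst generalizing d with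
  | nil => simp [pairsOf]
  | cons e t ih =>
    simp only [List.foldl_cons, ih, pairsOf, List.flatMap_cons, List.foldl_append]
    congr 1
    unfold entryPairs bParse
    cases h : PySem.Str.split? e " - " with
    | none => rfl
    | some parts =>
      match parts with
      | [] => rfl
      | [a] => rfl
      | a :: b :: c :: t' => rfl
      | [a, b] =>
        show _ = List.foldl pstep d (List.map (fun l => (l, a)) _)
        rw [List.foldl_map]
        rfl

lemma B_pairs (lst : List String) (acc : List (String × String)) :
    lst.foldl (fun ps entry =>
      match bParse entry with
      | some (english_word, translations) =>
        ((PySem.Str.split? translations ", ").getD []).foldl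
          (fun ps latin_word => ps ++ [(latin_word, english_word)]) ps
      | none => ps) acc = acc ++ pairsOf lst := by
  induction lst generalizing acc with
  | nil => simp [pairsOf]
  | cons e t ih =>
    simp only [List.foldl_cons, ih, pairsOf, List.flatMap_cons]
    have he : (match bParse e with
      | some (english_word, translations) =>
        List.foldl (fun ps latin_word => ps ++ [(latin_word, english_word)]) acc
          ((PySem.Str.split? translations ", ").getD [])
      | none => acc) = acc ++ entryPairs e := by
      unfold entryPairs
      cases h : bParse e with
      | none => simp
      | some p =>
        obtain ⟨a, b⟩ := p
        exact PySem.List.foldl_append_singleton_eq_map _ _ _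
    rw [he, List.append_assoc]

lemma keys_upsert (acc : List (String × List String)) (l e : String) :
    (upsert acc l e).map Prod.fst =
      if l ∈ acc.map Prod.fst then acc.map Prod.fst else acc.map Prod.fst ++ [l] := by
  induction acc with
  | nil => simp [upsert]
  | cons p t ih =>
    obtain ⟨k, vs⟩ := p
    by_cases hk : k = l
    · simp [upsert, hk]
    · simp only [upsert, if_neg hk, List.map_cons, ih]
      by_cases hm : l ∈ t.map Prod.fst
      · simp [hm, hk, Ne.symm hk]
      · simp [hm, hk, Ne.symm hk]

lemma alook_upsert (acc : List (String × List String)) (l e k : String) :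
    alook (upsert acc l e) k =
      if k = l then some (((alook acc l).getD []) ++ [e]) else alook acc k := by
  induction acc with
  | nil =>
    by_cases hk : k = l
    · subst hk; simp [upsert, alook]
    · simp [upsert, alook, hk, Ne.symm hk]
  | cons p t ih =>
    obtain ⟨k', vs⟩ := p
    by_cases h1 : k' = l
    · subst h1
      by_cases h2 : k = k'
      · subst h2; simp [upsert, alook]
      · simp [upsert, alook, h2, Ne.symm h2]
    · by_cases h2 : k' = k
      · subst h2
        have h1' : ¬ k' = l := h1
        have h3 : ¬ l = k' := fun h => h1 h.symm
        simp [upsert, alook, h1', h3]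
      · simp [upsert, alook, h1, h2, ih]

lemma mem_iff_alook (acc : List (String × List String))
    (hnd : (acc.map Prod.fst).Nodup) (k : String) (vs : List String) :
    (k, vs) ∈ acc ↔ alook acc k = some vs := by
  induction acc with
  | nil => simp [alook]
  | cons p t ih =>
    obtain ⟨a, ws⟩ := p
    simp only [List.map_cons, List.nodup_cons] at hnd
    by_cases h : a = k
    · subst h
      have hnot : (a, vs) ∉ t := fun hmem => hnd.1 (List.mem_map_of_mem hmem)
      have halook : alook ((a, ws) :: t) a = some ws := by simp [alook]
      rw [halook, List.mem_cons]
      constructor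
      · rintro (heq | hmem)
        · injection heq with _ h2
          rw [h2]
        · exact absurd hmem hnot
      · intro h'
        left
        rw [Option.some.inj h']
    · have hne : k ≠ a := fun hh => h hh.symm
      simp [alook, h, ih hnd.2, hne]

lemma pstep_nil (l e : String) : (pstep ⟨[]⟩ (l, e)).items = [(l, [e])] := by
  simp [pstep, PySem.Dict.get?, PySem.Dict.insert, PySem.Dict.modify,
    PySem.Dict.getD, PySem.Dict.contains]

lemma pstep_cons (k : String) (vs : List String) (t : List (String × List String))
    (l e : String) (hk : k ≠ l) :
    (pstep ⟨(k, vs) :: t⟩ (l, e)).items = (k, vs) :: (pstep ⟨t⟩ (l, e)).items := by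
  have hbeq : (k == l) = false := beq_eq_false_iff_ne.mpr hk
  simp only [pstep, PySem.Dict.get?, PySem.Dict.insert, PySem.Dict.modify,
    PySem.Dict.getD, PySem.Dict.contains, List.find?_cons, hbeq]
  cases hf : List.find? (fun p => p.1 == l) t with
  | none =>
    have hany : (t.any fun p => p.1 == l) = false := by
      rw [List.any_eq_false]
      intro p hp
      simpa using List.find?_eq_none.mp hf p hp
    simp [hf, hbeq, hk, hany, List.any_cons, List.any_append, List.find?_cons]
  | some q =>
    have hmem := List.mem_of_find?_eq_some hf
    have hpred : (q.1 == l) = true := by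
      have h' := List.find?_some hf
      simpa using h' 
    have hany : (t.any fun p => p.1 == l) = true :=
      List.any_eq_true.mpr ⟨q, hmem, hpred⟩
    simp [hf, hbeq, hk, hany, List.any_cons, List.find?_cons]

lemma pstep_head (l : String) (vs : List String) (t : List (String × List String))
    (e : String) (hnot : ∀ q ∈ t, (q.1 == l) = false) :
    (pstep ⟨(l, vs) :: t⟩ (l, e)).items = (l, vs ++ [e]) :: t := by
  have hmap : List.map (fun p => if p.1 = l then (l, vs ++ [e]) else p) t = t := by
    have hcongr : ∀ q ∈ t, (if q.1 = l then (l, vs ++ [e]) else q) = id q := by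
      intro q hq
      have : ¬ q.1 = l := by simpa using hnot q hq
      simp [this]
    rw [List.map_congr_left hcongr, List.map_id]
  simp [pstep, PySem.Dict.get?, PySem.Dict.insert, PySem.Dict.modify,
    PySem.Dict.getD, PySem.Dict.contains, List.find?_cons, List.any_cons, hmap]

lemma pstep_items (acc : List (String × List String))
    (hnd : (acc.map Prod.fst).Nodup) (l e : String) :
    (pstep ⟨acc⟩ (l, e)).items = upsert acc l e := by
  induction acc with
  | nil => simpa [upsert] using pstep_nil l e
  | cons p t ih =>
    obtain ⟨k, vs⟩ := p
    simp only [List.map_cons, List.nodup_cons] at hnd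
    by_cases hk : k = l
    · subst hk
      have hnot : ∀ q ∈ t, (q.1 == k) = false := by
        intro q hq
        rw [beq_eq_false_iff_ne]
        intro h
        exact hnd.1 (h ▸ List.mem_map_of_mem (f := Prod.fst) hq)
      rw [pstep_head _ _ _ _ hnot]
      simp [upsert]
    · rw [pstep_cons _ _ _ _ _ hk, ih hnd.2]
      simp [upsert, hk]

lemma nodup_keys_groupPairs (ps : List (String × String)) :
    ((groupPairs ps).map Prod.fst).Nodup := by
  have main : ∀ (qs : List (String × String)) (acc : List (String × List String)),
      (acc.map Prod.fst).Nodup →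
      ((qs.foldl (fun acc p => upsert acc p.1 p.2) acc).map Prod.fst).Nodup := by
    intro qs
    induction qs with
    | nil => intro acc h; simpa using h
    | cons p t ih =>
      intro acc h
      refine ih _ ?_
      rw [keys_upsert]
      by_cases hm : p.1 ∈ acc.map Prod.fst
      · simpa [hm] using h
      · simp only [if_neg hm]
        exact List.Nodup.append h (List.nodup_singleton _) (by simpa using hm)
  simpa [groupPairs] using main ps [] (by simp)

lemma groupPairs_concat (ps : List (String × String)) (p : String × String) :
    groupPairs (ps ++ [p]) = upsert (groupPairs ps) p.1 p.2 := by
  simp [groupPairs, List.foldl_append]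

lemma dict_items (ps : List (String × String)) :
    (ps.foldl pstep ⟨[]⟩).items = groupPairs ps := by
  induction ps using List.reverseRecOn with
  | nil => rfl
  | append_singleton t p ih =>
    rw [List.foldl_append, groupPairs_concat]
    have : t.foldl pstep ⟨[]⟩ = (⟨groupPairs t⟩ : PySem.Dict String (List String)) := by
      cases h : t.foldl pstep ⟨[]⟩
      simpa using ih ▸ h ▸ rfl
    rw [List.foldl_cons, List.foldl_nil, this]
    exact pstep_items _ (nodup_keys_groupPairs t) p.1 p.2

lemma valuesOf_concat (ps : List (String × String)) (q : String × String) (k : String) :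
    valuesOf (ps ++ [q]) k = valuesOf ps k ++ (if q.1 = k then [q.2] else []) := by
  by_cases h : q.1 = k <;> simp [valuesOf, List.filter_append, h]

lemma alook_groupPairs (ps : List (String × String)) (k : String) :
    alook (groupPairs ps) k = if valuesOf ps k = [] then none else some (valuesOf ps k) := by
  induction ps using List.reverseRecOn with
  | nil => simp [groupPairs, alook, valuesOf]
  | append_singleton t q ih =>
    obtain ⟨l, e⟩ := q
    rw [groupPairs_concat, alook_upsert, valuesOf_concat]
    dsimp only
    by_cases hk : k = l
    · subst hk
      rw [if_pos rfl, if_pos rfl, ih]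
      by_cases hv : valuesOf t k = [] <;> simp [hv]
    · have hlk : ¬ l = k := fun h => hk h.symm
      rw [if_neg hk, if_neg hlk, ih]
      simp

lemma valuesOf_ne_nil_iff (ps : List (String × String)) (k : String) :
    valuesOf ps k ≠ [] ↔ k ∈ ps.map Prod.fst := by
  constructor
  · intro h
    cases hf : ps.filter (fun p => p.1 == k) with
    | nil => exact absurd (by simp [valuesOf, hf]) h
    | cons p t =>
      have hp : p ∈ ps.filter (fun p => p.1 == k) := by rw [hf]; exact List.mem_cons_self
      have hmem := List.mem_filter.mp hp
      exact (beq_iff_eq.mp hmem.2) ▸ List.mem_map_of_mem hmem.1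
  · intro h hnil
    rcases List.mem_map.mp h with ⟨p, hp, rfl⟩
    simp only [valuesOf, List.map_eq_nil_iff, List.filter_eq_nil_iff] at hnil
    exact hnil p hp (by simp)

lemma mem_sortedKeys (ps : List (String × String)) (k : String) :
    k ∈ sortedKeys ps ↔ k ∈ ps.map Prod.fst := by
  rw [sortedKeys, PySem.List.mem_sorted, keysOf, PySem.List.mem_dedup]

lemma pairwise_lt_sortedKeys (ps : List (String × String)) :
    (sortedKeys ps).Pairwise (· < ·) := by
  exact PySem.List.sorted_ofList_pairwise_lt _

lemma nodup_sortedKeys (ps : List (String × String)) : (sortedKeys ps).Nodup :=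
  (pairwise_lt_sortedKeys ps).imp ne_of_lt

-- the sorted items of A's dict, named
lemma sorted_groupPairs (ps : List (String × String)) :
    PySem.List.sorted (groupPairs ps) (fun p => p.1) =
      (sortedKeys ps).map (fun k => (k, valuesOf ps k)) := by
  apply PySem.List.sorted_eq_of_perm_of_pairwise_lt
  · rw [List.perm_ext_iff_of_nodup]
    · rintro ⟨k, vs⟩
      rw [mem_iff_alook _ (nodup_keys_groupPairs ps), alook_groupPairs]
      constructor
      · intro h
        rcases List.mem_map.mp h with ⟨a, ha, hEq⟩
        obtain ⟨rfl, rfl⟩ : a = k ∧ valuesOf ps a = vs := by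
          injection hEq with h1 h2; exact ⟨h1, h2⟩
        have : valuesOf ps a ≠ [] :=
          (valuesOf_ne_nil_iff ps a).mpr ((mem_sortedKeys ps a).mp ha)
        rw [if_neg this]
      · intro h
        by_cases hv : valuesOf ps k = []
        · simp [hv] at h
        · rw [if_neg hv] at h
          obtain rfl : valuesOf ps k = vs := Option.some.inj h
          exact List.mem_map.mpr ⟨k,
            (mem_sortedKeys ps k).mpr ((valuesOf_ne_nil_iff ps k).mp hv), rfl⟩
    · refine List.Nodup.map ?_ (nodup_sortedKeys ps)
      intro a b h
      exact congrArg Prod.fst h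
    · exact (nodup_keys_groupPairs ps).of_map _
  · rw [List.pairwise_map]
    exact pairwise_lt_sortedKeys ps

-- ========== B side ==========

lemma lexLe_trans : ∀ a b c : String × String, lexLe a b → lexLe b c → lexLe a c := by
  rintro a b c (h1 | ⟨h1, h1'⟩) (h2 | ⟨h2, h2'⟩)
  · exact Or.inl (lt_trans h1 h2)
  · exact Or.inl (h2 ▸ h1)
  · exact Or.inl (h1 ▸ h2)
  · exact Or.inr ⟨h1.trans h2, le_trans h1' h2'⟩

lemma lexLe_antisymm : ∀ a b : String × String, lexLe a b → lexLe b a → a = b := by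
  rintro ⟨a1, a2⟩ ⟨b1, b2⟩ (h1 | ⟨h1, h1'⟩) (h2 | ⟨h2, h2'⟩)
  · exact absurd h2 (lt_asymm h1)
  · exact absurd h1 (h2 ▸ lt_irrefl _)
  · exact absurd h2 (h1 ▸ lt_irrefl _)
  · exact Prod.ext_iff.mpr ⟨h1, le_antisymm h1' h2'⟩

def lexBefore (a b : String × String) : Bool :=
  decide (a.1 < b.1) || !decide (b.1 < a.1) && decide (a.2 < b.2)

lemma lexBefore_true {a b : String × String} (h : lexBefore a b = true) : lexLe a b := by
  simp only [lexBefore, Bool.or_eq_true, Bool.and_eq_true, Bool.not_eq_true',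
    decide_eq_true_eq, decide_eq_false_iff_not] at h
  rcases h with h | ⟨h1, h2⟩
  · exact Or.inl h
  · rcases eq_or_lt_of_le (not_lt.mp h1) with heq | hlt
    · exact Or.inr ⟨heq, le_of_lt h2⟩
    · exact Or.inl hlt

lemma lexBefore_false {a b : String × String} (h : lexBefore a b = false) : lexLe b a := by
  simp only [lexBefore, Bool.or_eq_false_iff, Bool.and_eq_false_iff, Bool.not_eq_false',
    decide_eq_false_iff_not, decide_eq_true_eq] at h
  obtain ⟨h1, h2⟩ := h
  rcases h2 with h2 | h2
  · exact Or.inl h2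
  · rcases eq_or_lt_of_le (not_lt.mp h1) with heq | hlt
    · exact Or.inr ⟨heq, not_lt.mp h2⟩
    · exact Or.inl hlt

lemma insertBy_cons (before : (String × String) → (String × String) → Bool)
    (x y : String × String) (ys : List (String × String)) :
    PySem.List.insertBy before x (y :: ys) =
      if before x y = true then x :: y :: ys else y :: PySem.List.insertBy before x ys := rfl

lemma pairwise_insertBy_lex (x : String × String) (ys : List (String × String))
    (h : ys.Pairwise lexLe) :
    (PySem.List.insertBy lexBefore x ys).Pairwise lexLe := by
  induction ys with
  | nil => simp [PySem.List.insertBy]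
  | cons y t ih =>
    rw [List.pairwise_cons] at h
    rw [insertBy_cons]
    by_cases hb : lexBefore x y = true
    · rw [if_pos hb]
      refine List.Pairwise.cons ?_ (List.Pairwise.cons h.1 h.2)
      intro z hz
      rcases List.mem_cons.mp hz with rfl | hz
      · exact lexBefore_true hb
      · exact lexLe_trans _ _ _ (lexBefore_true hb) (h.1 z hz)
    · rw [if_neg hb]
      refine List.Pairwise.cons ?_ (ih h.2)
      intro z hz
      rw [PySem.List.insertBy_mem_iff] at hz
      rcases hz with rfl | hz
      · exact lexBefore_false (by simpa using hb)
      · exact h.1 z hz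

lemma pairwise_sorted2 (ps : List (String × String)) :
    (PySem.List.sorted2 ps (fun p => p.1) (fun p => p.2)).Pairwise lexLe := by
  have hrfl : PySem.List.sorted2 ps (fun p => p.1) (fun p => p.2) =
      ps.foldl (fun acc x => PySem.List.insertBy lexBefore x acc) [] := rfl
  rw [hrfl]
  have main : ∀ (qs : List (String × String)) (acc : List (String × String)),
      acc.Pairwise lexLe →
      (qs.foldl (fun acc x => PySem.List.insertBy lexBefore x acc) acc).Pairwise lexLe := by
    intro qs
    induction qs with
    | nil => intro acc h; simpa using h
    | cons q t ih => intro acc h; exact ih _ (pairwise_insertBy_lex q acc h)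
  exact main ps [] (by simp)

def grp (ps : List (String × String)) (k : String) : List (String × String) :=
  (PySem.List.sorted (valuesOf ps k) (fun w => w)).map (fun e => (k, e))

def target2 (ps : List (String × String)) : List (String × String) :=
  (sortedKeys ps).flatMap (grp ps)

lemma valuesOf_cons (k e a : String) (t : List (String × String)) :
    valuesOf ((k, e) :: t) a = if k = a then e :: valuesOf t a else valuesOf t a := by
  by_cases h : k = a <;> simp [valuesOf, List.filter_cons, h]

lemma count_pair (ps : List (String × String)) (a b : String) :
    ps.count (a, b) = (valuesOf ps a).count b := by
  induction ps with
  | nil => simp [valuesOf]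
  | cons p t ih =>
    obtain ⟨k, e⟩ := p
    by_cases hk : k = a
    · subst hk
      by_cases he : e = b
      · subst he; simp [valuesOf_cons, List.count_cons, ih]
      · simp [valuesOf_cons, List.count_cons, ih, he, Prod.ext_iff]
    · simp [valuesOf_cons, List.count_cons, ih, hk, Prod.ext_iff]

lemma count_map_pair (k : String) (l : List String) (a b : String) :
    (l.map (fun e => (k, e))).count (a, b) = if k = a then l.count b else 0 := by
  induction l with
  | nil => simp
  | cons e t ih =>
    by_cases hk : k = a
    · subst hk
      by_cases he : e = b
      · subst he; simp [List.count_cons, ih]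
      · simp [List.count_cons, ih, he, Prod.ext_iff]
    · simp [List.count_cons, ih, hk, Prod.ext_iff]

lemma count_grp (ps : List (String × String)) (k a b : String) :
    (grp ps k).count (a, b) = if k = a then (valuesOf ps a).count b else 0 := by
  rw [grp, count_map_pair]
  by_cases hk : k = a
  · subst hk
    rw [if_pos rfl, if_pos rfl,
      (PySem.List.sorted_perm (valuesOf ps k) (fun w => w) false).count_eq]
  · simp [hk]

lemma count_flatMap_grp (ps : List (String × String)) (a b : String) :
    ∀ (K : List String), K.Nodup →
      (K.flatMap (grp ps)).count (a, b) =
        if a ∈ K then (valuesOf ps a).count b else 0 := by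
  intro K
  induction K with
  | nil => simp
  | cons k K' ih =>
    intro hnd
    rw [List.nodup_cons] at hnd
    rw [List.flatMap_cons, List.count_append, count_grp, ih hnd.2]
    by_cases hk : k = a
    · subst hk
      simp [hnd.1]
    · have hak : ¬ a = k := fun h => hk h.symm
      by_cases hm : a ∈ K' <;> simp [hk, hak, hm]

lemma perm_target2 (ps : List (String × String)) : (target2 ps).Perm ps := by
  rw [List.perm_iff_count]
  intro q
  obtain ⟨a, b⟩ := q
  rw [target2, count_flatMap_grp ps a b _ (nodup_sortedKeys ps), count_pair]
  by_cases hm : a ∈ sortedKeys ps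
  · simp [hm]
  · have : valuesOf ps a = [] := by
      by_contra hne
      exact hm ((mem_sortedKeys ps a).mpr ((valuesOf_ne_nil_iff ps a).mp hne))
    simp [hm, this]

lemma pairwise_target2 (ps : List (String × String)) : (target2 ps).Pairwise lexLe := by
  rw [target2, List.pairwise_flatMap]
  constructor
  · intro k _
    rw [grp, List.pairwise_map]
    refine (PySem.List.sorted_pairwise (valuesOf ps k) (fun w => w)).imp ?_
    intro e1 e2 h
    exact Or.inr ⟨rfl, h⟩
  · refine (pairwise_lt_sortedKeys ps).imp ?_
    intro k1 k2 hlt x hx y hy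
    rcases List.mem_map.mp hx with ⟨e1, _, rfl⟩
    rcases List.mem_map.mp hy with ⟨e2, _, rfl⟩
    exact Or.inl hlt

lemma sorted2_eq_target2 (ps : List (String × String)) :
    PySem.List.sorted2 ps (fun p => p.1) (fun p => p.2) = target2 ps := by
  refine List.Perm.eq_of_pairwise (fun a b _ _ => lexLe_antisymm a b)
    (pairwise_sorted2 ps) (pairwise_target2 ps) ?_
  exact (PySem.List.sorted2_perm ps _ _ false).trans (perm_target2 ps).symm

lemma fold_tail (k : String) (es : List String) :
    ∀ (res : List String) (s : String),
      (es.map (fun e => (k, e))).foldl gstep (res ++ [s], some k) =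
        (res ++ [joinTail s es], some k) := by
  induction es with
  | nil => intro res s; simp [joinTail]
  | cons e t ih =>
    intro res s
    rw [List.map_cons, List.foldl_cons]
    have hstep : gstep (res ++ [s], some k) (k, e) = (res ++ [s ++ ", " ++ e], some k) := by
      rw [gstep, if_pos ⟨by simp, rfl⟩]
      simp [List.dropLast_concat, getLast!_concat]
    rw [hstep, ih]
    rfl

lemma joinTail_prepend (a : String) (es : List String) :
    ∀ s, joinTail (a ++ s) es = a ++ joinTail s es := by
  induction es with
  | nil => intro s; rfl
  | cons e t ih =>
    intro s
    show joinTail (a ++ s ++ ", " ++ e) t = a ++ joinTail (s ++ ", " ++ e) t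
    have hassoc : a ++ s ++ ", " ++ e = a ++ (s ++ ", " ++ e) := by
      simp [String.append_assoc]
    rw [hassoc, ih]

lemma joinTail_join (es : List String) :
    ∀ e0, joinTail e0 es = PySem.Str.join ", " (e0 :: es) := by
  induction es with
  | nil => intro e0; exact (join_single _ _).symm
  | cons e1 t ih =>
    intro e0
    show joinTail (e0 ++ ", " ++ e1) t = _
    rw [joinTail_prepend (e0 ++ ", ") t e1, ih e1, join_cons₂, String.append_assoc]

lemma fold_groups (ps : List (String × String)) :
    ∀ (K : List String) (res : List String) (prev : Option String),
      (∀ k ∈ K, valuesOf ps k ≠ []) → (∀ k ∈ K, prev ≠ some k) → K.Pairwise (· < ·) →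
      ((K.flatMap (grp ps)).foldl gstep (res, prev)).1 = res ++ K.map (fmt ps) := by
  intro K
  induction K with
  | nil => intro res prev _ _ _; simp
  | cons k K' ih =>
    intro res prev hval hprev hpw
    rw [List.flatMap_cons, List.foldl_append]
    obtain ⟨e0, es, hse⟩ : ∃ e0 es, PySem.List.sorted (valuesOf ps k) (fun w => w) = e0 :: es := by
      cases hs : PySem.List.sorted (valuesOf ps k) (fun w => w) with
      | nil =>
        rw [PySem.List.sorted_eq_nil_iff] at hs
        exact absurd hs (hval k List.mem_cons_self)
      | cons e0 es => exact ⟨e0, es, rfl⟩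
    rw [grp, hse, List.map_cons, List.foldl_cons]
    have hstep : gstep (res, prev) (k, e0) = (res ++ [k ++ " - " ++ e0], some k) := by
      rw [gstep, if_neg]
      rintro ⟨_, h2⟩
      exact hprev k List.mem_cons_self h2.symm
    rw [hstep, fold_tail, joinTail_prepend (k ++ " - ") es e0, joinTail_join es e0]
    rw [List.pairwise_cons] at hpw
    have := ih (res ++ [k ++ " - " ++ PySem.Str.join ", " (e0 :: es)]) (some k)
      (fun k' hk' => hval k' (List.mem_cons_of_mem _ hk'))
      (fun k' hk' h => absurd (Option.some.inj h) (ne_of_lt (hpw.1 k' hk')))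
      hpw.2
    rw [this, List.append_assoc, List.map_cons]
    have hfmt : fmt ps k = k ++ " - " ++ PySem.Str.join ", " (e0 :: es) := by rw [fmt, hse]
    rw [hfmt]
    rfl

theorem create_latin_english_dictionary_spec : Claim_equal_create_latin_english_dictionary := by
  intro n lst _ _
  unfold Spec_create_latin_english_dictionary
  unfold create_latin_english_dictionary create_latin_english_dictionary_alt
  rw [A_pairs, B_pairs]
  dsimp only
  rw [List.nil_append, dict_items, sorted_groupPairs, PySem.List.foldl_append_singleton_eq_map,
    List.nil_append, List.map_map, sorted2_eq_target2]
  have hg : (fun (st : List String × Option String) (p : String × String) =>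
      if st.1 ≠ [] ∧ some p.1 = st.2 then (st.1.dropLast ++ [st.1.getLast! ++ ", " ++ p.2], st.2)
      else (st.1 ++ [p.1 ++ " - " ++ p.2], some p.1)) = gstep := rfl
  rw [hg]
  rw [target2]
  rw [fold_groups (pairsOf lst) (sortedKeys (pairsOf lst)) [] none
    (fun k hk => (valuesOf_ne_nil_iff _ k).mpr ((mem_sortedKeys _ k).mp hk))
    (fun k _ h => by exact absurd h (by simp))
    (pairwise_lt_sortedKeys _)]
  rw [List.nil_append]
  rfl
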